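-- pv_equiv track=rewrite | github.com/Ansu-dev/programmerce-practice | level_1/82612.py | solution
-- ===== SOURCE A (Python) =====
-- def solution(price, money, count):
--     answer = 0
--
--     amount = 0
--     for i in range(1, count + 1):
--         amount += price * i
--
--     if amount > money:
--         answer = amount - money
--     return answer
-- ===== SOURCE B (Python) =====
-- def solution(price, money, count):
--     n = count if count > 0 else 0
--     total = price * (n * (n + 1) // 2)
--     return max(total - money, 0)
-- ===== Notes on version B (the rewrite author's own statement) =====
-- stated objective: faster
-- what changed: Replaced the O(count) accumulation loop with the closed-form triangular-number formula price*n*(n+1)//2 and a max for the shortfall.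
import Mathlib
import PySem

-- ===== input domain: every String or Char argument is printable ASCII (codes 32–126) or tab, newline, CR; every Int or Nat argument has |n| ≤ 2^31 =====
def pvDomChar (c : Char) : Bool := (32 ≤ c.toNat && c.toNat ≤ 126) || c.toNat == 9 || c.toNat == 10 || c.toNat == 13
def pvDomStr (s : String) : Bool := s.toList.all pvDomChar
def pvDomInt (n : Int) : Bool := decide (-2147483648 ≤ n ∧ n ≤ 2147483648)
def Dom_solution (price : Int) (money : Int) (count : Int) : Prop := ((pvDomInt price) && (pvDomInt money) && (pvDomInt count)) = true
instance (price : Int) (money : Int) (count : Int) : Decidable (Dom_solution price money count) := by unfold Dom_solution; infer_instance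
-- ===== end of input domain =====

-- B replaces A's O(count) accumulation loop with the closed-form triangular sum (O(1)).

-- ===== PORT A =====
def solution (price : Int) (money : Int) (count : Int) : Int :=
  let answer : Int := 0
  let amount : Int := (PySem.List.pyRange 1 (count + 1) 1).foldl
    (fun amount i => amount + price * i) 0
  let answer := if amount > money then amount - money else answer
  answer

-- ===== PORT B =====
def solution_alt (price : Int) (money : Int) (count : Int) : Int :=
  let n : Int := if count > 0 then count else 0
  let total : Int := price * (PySem.Int.floordiv (n * (n + 1)) 2)
  max (total - money) 0

-- ===== PRECONDITION & SPEC =====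
def Spec_solution (price : Int) (money : Int) (count : Int) (out : Int) : Prop := out = solution_alt price money count
instance (price : Int) (money : Int) (count : Int) (out : Int) : Decidable (Spec_solution price money count out) := by unfold Spec_solution; infer_instance

-- ===== CLAIM (what is proved, stated in full; the proofs are below) =====
def Claim_equal_solution : Prop := ∀ (price : Int) (money : Int) (count : Int), Dom_solution price money count → Spec_solution price money count (solution price money count)

-- ===== LEMMAS AND PROOFS =====

-- Twice the loop's accumulated sum is price * n * (n+1).
theorem pv_foldl_sum (price : Int) : ∀ (n : Nat) (c : Int),
    2 * ((PySem.List.pyRange 1 ((n : Int) + 1) 1).foldl (fun a i => a + price * i) c)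
      = 2 * c + price * ((n : Int) * ((n : Int) + 1)) := by
  intro n
  induction n with
  | zero =>
    intro c
    rw [PySem.List.pyRange_one_eq_nil (by norm_num)]
    simp
  | succ m ih =>
    intro c
    rw [show ((m + 1 : Nat) : Int) + 1 = ((m : Int) + 1) + 1 by push_cast; ring,
        PySem.List.pyRange_one_succ_right (by omega),
        List.foldl_append]
    simp only [List.foldl_cons, List.foldl_nil]
    push_cast
    linear_combination ih c

-- ===== VERDICT (by name: the statement is the Claim_ definition above) =====
theorem solution_spec : Claim_equal_solution := by
  intro price money count _
  unfold Spec_solution solution solution_alt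
  by_cases h : count > 0
  · -- count > 0: the loop sums i = 1 … count
    simp only [if_pos h]
    obtain ⟨n, rfl⟩ : ∃ n : Nat, count = (n : Int) := ⟨count.toNat, (Int.toNat_of_nonneg (by omega)).symm⟩
    have hsum := pv_foldl_sum price n 0
    obtain ⟨m, hm⟩ : ∃ m : Int, (n : Int) * ((n : Int) + 1) = 2 * m := by
      rcases Int.even_mul_succ_self (n : Int) with ⟨m, hm⟩
      exact ⟨m, by omega⟩
    rw [PySem.Int.floordiv_eq_ediv_of_pos (by norm_num), hm, Int.mul_ediv_cancel_left _ (by norm_num)]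
    have hF : (PySem.List.pyRange 1 ((n : Int) + 1) 1).foldl (fun a i => a + price * i) 0
        = price * m := by
      rw [hm] at hsum; nlinarith [hsum]
    rw [hF]
    by_cases hle : price * m ≤ money
    · simp only [if_neg (not_lt.mpr hle)]
      omega
    · simp only [if_pos (not_le.mp hle)]
      omega
  · -- count ≤ 0: the loop is empty on both sides
    simp only [if_neg h]
    rw [PySem.List.pyRange_one_eq_nil (by omega)]
    simp only [List.foldl_nil]
    rw [show (0 : Int) * (0 + 1) = 0 by ring]
    rw [show PySem.Int.floordiv 0 2 = 0 from by
      rw [PySem.Int.floordiv_eq_ediv_of_pos (by norm_num)]; simp]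
    by_cases hle : (0 : Int) ≤ money
    · simp only [if_neg (not_lt.mpr hle)]; omega
    · simp only [if_pos (not_le.mp hle)]; omega
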